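-- pv_equiv track=rewrite | github.com/loganmeetsworld/advent-of-code | 2021/13/solution.py | create_dot_map
-- ===== SOURCE A (Python) =====
-- def create_dot_map(dot_locations):
--     width = max(i[0] for i in dot_locations) + 1
--     height = max(i[1] for i in dot_locations) + 1
--     grid = []
--     [grid.append(['.'] * width) for _ in range(height)]
--
--     for x, y in dot_locations:
--         grid[y][x] = "#"
--
--     return grid
-- ===== SOURCE B (Python) =====
-- def create_dot_map(dot_locations):
--     width = max(i[0] for i in dot_locations) + 1
--     height = max(i[1] for i in dot_locations) + 1
--     columns = [[False] * height for _ in range(width)]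
--     for x, y in dot_locations:
--         columns[x][y] = True
--     return [['#' if dot else '.' for dot in row] for row in zip(*columns)]
-- ===== Notes on version B (the rewrite author's own statement) =====
-- stated objective: alternative
-- what changed: B separates marking from rendering: it paints dots into a column-major boolean mask and then produces the output grid in one transpose-and-render comprehension, instead of A's pre-filled list-of-'.'-rows mutated cell by cell into the final strings.
import Mathlib
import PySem

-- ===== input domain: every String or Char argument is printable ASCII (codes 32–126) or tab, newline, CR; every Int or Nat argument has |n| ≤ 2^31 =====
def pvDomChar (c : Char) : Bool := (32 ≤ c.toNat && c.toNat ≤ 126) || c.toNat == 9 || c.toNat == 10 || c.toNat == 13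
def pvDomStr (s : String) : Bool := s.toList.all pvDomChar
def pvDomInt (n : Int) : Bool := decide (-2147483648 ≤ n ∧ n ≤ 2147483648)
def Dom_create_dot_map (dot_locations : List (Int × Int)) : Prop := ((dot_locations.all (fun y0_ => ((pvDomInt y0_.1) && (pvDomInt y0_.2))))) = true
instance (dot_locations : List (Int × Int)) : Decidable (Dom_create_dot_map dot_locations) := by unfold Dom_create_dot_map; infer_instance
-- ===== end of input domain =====

-- B separates marking from rendering: it paints the dots into a column-major boolean mask and
-- produces the grid by transposing and rendering each cell, instead of A's pre-filled '.' string
-- rows mutated in place (objective: alternative decomposition, same cost).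


-- ===== PORT A =====
-- Python's 'g[i][j] = v' on a list of lists (negative-index semantics on both levels)
def pvMark {α : Type} (m : α) (g : List (List α)) (i j : Int) : List (List α) :=
  PySem.List.pySetD g i (PySem.List.pySetD (PySem.List.pyGetD g i []) j m)

def create_dot_map (dot_locations : List (Int × Int)) : List (List String) :=
  let width : Int := (PySem.List.max? (dot_locations.map Prod.fst) (fun x => x)).getD 0 + 1
  let height : Int := (PySem.List.max? (dot_locations.map Prod.snd) (fun x => x)).getD 0 + 1
  let grid : List (List String) :=
    (PySem.List.pyRange 0 height 1).map (fun _ => List.replicate width.toNat ".")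
  dot_locations.foldl (fun g p => pvMark "#" g p.2 p.1) grid

-- ===== PORT B =====
-- termination measure lemmas for pvZipStar (cited by its decreasing_by)
theorem pv_sum_tails_le (t : List (List Bool)) :
    (t.map (fun c => c.tail.length)).sum ≤ (t.map List.length).sum := by
  induction t with
  | nil => simp
  | cons c r ih => simp only [List.map_cons, List.sum_cons]; have := c.length_tail; omega

theorem pv_sum_tails_lt (cols : List (List Bool)) (h1 : cols ≠ [])
    (h2 : ¬ cols.any List.isEmpty = true) :
    ((cols.map List.tail).map List.length).sum < (cols.map List.length).sum := by
  cases cols with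
  | nil => exact absurd rfl h1
  | cons c r =>
    simp only [List.any_cons, Bool.or_eq_true, not_or] at h2
    have hc : c ≠ [] := by
      intro he; exact h2.1 (by simp [he])
    have hlc : c.tail.length < c.length := by
      cases c with
      | nil => exact absurd rfl hc
      | cons a as => simp
    have := pv_sum_tails_le r
    simp only [List.map_cons, List.sum_cons, List.map_map]
    have he : (r.map (List.length ∘ List.tail)) = r.map (fun c => c.tail.length) := rfl
    rw [he]
    omega

-- Python's zip(*columns): rows of simultaneous heads until some column runs out
def pvZipStar (cols : List (List Bool)) : List (List Bool) :=
  if h : cols = [] ∨ cols.any List.isEmpty then []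
  else (cols.map (fun c => c.headD false)) :: pvZipStar (cols.map List.tail)
termination_by (cols.map List.length).sum
decreasing_by
  have := pv_sum_tails_lt cols (fun he => h (Or.inl he)) (fun ha => h (Or.inr ha))
  simpa using this

def create_dot_map_alt (dot_locations : List (Int × Int)) : List (List String) :=
  let width : Int := (PySem.List.max? (dot_locations.map Prod.fst) (fun x => x)).getD 0 + 1
  let height : Int := (PySem.List.max? (dot_locations.map Prod.snd) (fun x => x)).getD 0 + 1
  let columns : List (List Bool) :=
    (PySem.List.pyRange 0 width 1).map (fun _ => List.replicate height.toNat false)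
  let painted : List (List Bool) :=
    dot_locations.foldl (fun cs p => pvMark true cs p.1 p.2) columns
  (pvZipStar painted).map (fun row => row.map (fun dot => if dot then "#" else "."))

-- ===== PRECONDITION & SPEC =====
-- Pre_ holds exactly where A returns normally: the list is nonempty (else max() raises
-- ValueError) and every coordinate is within Python index range of the computed grid
-- (else grid[y][x] = "#" raises IndexError).
def Pre_create_dot_map (dot_locations : List (Int × Int)) : Prop :=
  dot_locations ≠ [] ∧
  (∀ p ∈ dot_locations, ∃ q ∈ dot_locations, 0 ≤ q.1 ∧ -p.1 ≤ q.1 + 1) ∧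
  (∀ p ∈ dot_locations, ∃ q ∈ dot_locations, 0 ≤ q.2 ∧ -p.2 ≤ q.2 + 1)
instance (dot_locations : List (Int × Int)) : Decidable (Pre_create_dot_map dot_locations) := by
  unfold Pre_create_dot_map; infer_instance

def pvWitness_create_dot_map : (List (Int × Int)) := [(0, 0), (2, 1)]

def Spec_create_dot_map (dot_locations : List (Int × Int)) (out : List (List String)) : Prop :=
  out = create_dot_map_alt dot_locations
instance (dot_locations : List (Int × Int)) (out : List (List String)) : Decidable (Spec_create_dot_map dot_locations out) := by
  unfold Spec_create_dot_map; infer_instance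

-- ===== CLAIM (what is proved, stated in full; the proofs are below) =====
def Claim_equal_create_dot_map : Prop := ∀ (dot_locations : List (Int × Int)), Dom_create_dot_map dot_locations → Pre_create_dot_map dot_locations → Spec_create_dot_map dot_locations (create_dot_map dot_locations)

-- ===== LEMMAS AND PROOFS =====

theorem pv_mod_eq (i : Int) (n : Nat) (h1 : -(n : Int) ≤ i) (h2 : i < (n : Int)) :
    PySem.Int.mod i n = if i < 0 then i + n else i := by
  have hn : 0 < (n : Int) := by omega
  unfold PySem.Int.mod
  rw [Int.fmod_eq_emod, if_pos (Or.inl (le_of_lt hn)), add_zero]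
  split_ifs with h
  · have e1 : i % (n : Int) = (i + n) % n := by
      rw [show i + (n : Int) = i + n * 1 by ring, Int.add_mul_emod_self_left]
    rw [e1]
    exact Int.emod_eq_of_lt (by omega) (by omega)
  · exact Int.emod_eq_of_lt (by omega) h2

theorem pv_pySetD_inrange {α : Type} (xs : List α) (i : Int) (v : α)
    (h1 : -(xs.length : Int) ≤ i) (h2 : i < (xs.length : Int)) :
    PySem.List.pySetD xs i v = xs.set (PySem.Int.mod i xs.length).toNat v := by
  rw [pv_mod_eq i xs.length h1 h2]
  unfold PySem.List.pySetD PySem.List.pySet? PySem.List.pyIdx?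
  split_ifs with ha hb hc <;> try omega
  all_goals simp only [Option.map_some, Option.getD_some]
  all_goals first | rfl | (congr 1; omega)

theorem pv_pyGetD_inrange {α : Type} (xs : List α) (i : Int) (d : α)
    (h1 : -(xs.length : Int) ≤ i) (h2 : i < (xs.length : Int)) :
    PySem.List.pyGetD xs i d = xs.getD (PySem.Int.mod i xs.length).toNat d := by
  rw [pv_mod_eq i xs.length h1 h2]
  unfold PySem.List.pyGetD PySem.List.pyGet? PySem.List.pyIdx?
  split_ifs with ha hb hc <;> try omega
  all_goals rw [Option.bind_some, ← List.getD_eq_getElem?_getD]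
  all_goals first | rfl | (congr 1; omega)

theorem pv_pySetD_out {α : Type} (xs : List α) (i : Int) (v : α)
    (h : ¬ (-(xs.length : Int) ≤ i ∧ i < (xs.length : Int))) :
    PySem.List.pySetD xs i v = xs := by
  unfold PySem.List.pySetD PySem.List.pySet? PySem.List.pyIdx?
  split_ifs with ha hb hc <;> first | omega | rfl

theorem pv_getD_set {α : Type} (l : List α) (n : Nat) (r : α) (y : Nat) (d : α) :
    (l.set n r).getD y d = if n = y ∧ n < l.length then r else l.getD y d := by
  by_cases h : n = y ∧ n < l.length
  · obtain ⟨rfl, hlt⟩ := h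
    simp [List.getD, hlt]
  · rw [if_neg h]
    by_cases hny : n = y
    · have hlen : ¬ n < l.length := fun hl => h ⟨hny, hl⟩
      subst hny
      simp [List.getD, hlen]
    · simp [List.getD, hny]

theorem pvMark_len {α : Type} (m : α) (g : List (List α)) (i j : Int) :
    (pvMark m g i j).length = g.length := by
  simp [pvMark, PySem.List.length_pySetD]

theorem pv_paint_len {α : Type} (m : α) (ps : List (Int × Int)) (g : List (List α)) :
    (ps.foldl (fun g q => pvMark m g q.1 q.2) g).length = g.length := by
  induction ps generalizing g with
  | nil => rfl
  | cons p t ih => simp [List.foldl_cons, ih, pvMark_len]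

theorem pvMark_row_len {α : Type} (m : α) (g : List (List α)) (i j : Int) (y : Nat) :
    ((pvMark m g i j).getD y []).length = (g.getD y []).length := by
  by_cases hin : -(g.length : Int) ≤ i ∧ i < (g.length : Int)
  · unfold pvMark
    rw [pv_pySetD_inrange g i _ hin.1 hin.2, pv_pyGetD_inrange g i _ hin.1 hin.2,
        pv_getD_set]
    split_ifs with h
    · rw [PySem.List.length_pySetD, h.1]
    · rfl
  · unfold pvMark
    rw [pv_pySetD_out g i _ hin]

theorem pv_paint_row_len {α : Type} (m : α) (ps : List (Int × Int)) (g : List (List α)) (y : Nat) :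
    ((ps.foldl (fun g q => pvMark m g q.1 q.2) g).getD y []).length = (g.getD y []).length := by
  induction ps generalizing g with
  | nil => rfl
  | cons p t ih => rw [List.foldl_cons, ih, pvMark_row_len]

theorem pvMark_cell {α : Type} (m d : α) (g : List (List α)) (i j : Int) (R C : Nat)
    (hlen : g.length = R) (hrow : ∀ r : Nat, r < R → (g.getD r []).length = C)
    (hp1 : -(C : Int) ≤ j) (hp2 : j < (C : Int))
    (hp3 : -(R : Int) ≤ i) (hp4 : i < (R : Int))
    (r c : Nat) (hr : r < R) (hc : c < C) :
    ((pvMark m g i j).getD r []).getD c d =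
      if (PySem.Int.mod j C, PySem.Int.mod i R) = ((c : Int), (r : Int))
      then m else (g.getD r []).getD c d := by
  have hm2 := pv_mod_eq i R hp3 hp4
  have hm1 := pv_mod_eq j C hp1 hp2
  unfold pvMark
  rw [pv_pySetD_inrange g i _ (by omega) (by omega),
      pv_pyGetD_inrange g i _ (by omega) (by omega), hlen, pv_getD_set]
  by_cases hb : (PySem.Int.mod i R).toNat = r
  · rw [if_pos ⟨hb, by omega⟩, hb,
        pv_pySetD_inrange _ j _ (by rw [hrow r hr]; omega) (by rw [hrow r hr]; omega),
        hrow r hr, pv_getD_set]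
    by_cases ha : (PySem.Int.mod j C).toNat = c
    · rw [if_pos ⟨ha, by rw [hrow r hr]; omega⟩,
          if_pos (by simp only [Prod.mk.injEq]; omega)]
    · rw [if_neg (fun hcc => ha hcc.1),
          if_neg (by simp only [Prod.mk.injEq]; omega)]
  · rw [if_neg (fun hcc => hb hcc.1),
        if_neg (by simp only [Prod.mk.injEq]; omega)]

theorem pv_paint_cell {α : Type} (m d : α) (ps : List (Int × Int)) (g : List (List α)) (R C : Nat)
    (hlen : g.length = R) (hrow : ∀ r : Nat, r < R → (g.getD r []).length = C)
    (hb : ∀ q ∈ ps, -(R : Int) ≤ q.1 ∧ q.1 < (R : Int) ∧ -(C : Int) ≤ q.2 ∧ q.2 < (C : Int))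
    (r c : Nat) (hr : r < R) (hc : c < C) :
    ((ps.foldl (fun g q => pvMark m g q.1 q.2) g).getD r []).getD c d =
      if ((c : Int), (r : Int)) ∈ ps.map (fun q => (PySem.Int.mod q.2 C, PySem.Int.mod q.1 R))
      then m else (g.getD r []).getD c d := by
  induction ps generalizing g with
  | nil => simp
  | cons p t ih =>
    obtain ⟨b1, b2, b3, b4⟩ := hb p (by simp)
    rw [List.foldl_cons,
        ih (pvMark m g p.1 p.2) (by rw [pvMark_len]; exact hlen)
          (fun j hj => by rw [pvMark_row_len]; exact hrow j hj)
          (fun q hq => hb q (by simp [hq])),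
        pvMark_cell m d g p.1 p.2 R C hlen hrow b3 b4 b1 b2 r c hr hc]
    have hmem : (((c : Int), (r : Int)) ∈
          (p :: t).map (fun q => (PySem.Int.mod q.2 C, PySem.Int.mod q.1 R)))
        ↔ ((PySem.Int.mod p.2 C, PySem.Int.mod p.1 R) = ((c : Int), (r : Int))
            ∨ ((c : Int), (r : Int)) ∈ t.map (fun q => (PySem.Int.mod q.2 C, PySem.Int.mod q.1 R))) := by
      simp [List.map_cons, List.mem_cons, eq_comm]
    by_cases h1 : ((c : Int), (r : Int)) ∈
        t.map (fun q => (PySem.Int.mod q.2 C, PySem.Int.mod q.1 R))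
    · rw [if_pos h1, if_pos (hmem.mpr (Or.inr h1))]
    · rw [if_neg h1]
      by_cases h2 : (PySem.Int.mod p.2 C, PySem.Int.mod p.1 R) = ((c : Int), (r : Int))
      · rw [if_pos h2, if_pos (hmem.mpr (Or.inl h2))]
      · rw [if_neg h2, if_neg (fun hcm => ((hmem.mp hcm).elim h2 h1))]

theorem pv_headD_getD_zero {α : Type} (c : List α) (d : α) : c.headD d = c.getD 0 d := by
  cases c <;> rfl

theorem pvZipStar_eq (H : Nat) : ∀ cols : List (List Bool), cols ≠ [] →
    (∀ c ∈ cols, c.length = H) →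
    pvZipStar cols = (List.range H).map (fun y => cols.map (fun c => c.getD y false)) := by
  induction H with
  | zero =>
    intro cols h1 h2
    rw [pvZipStar.eq_def, dif_pos]
    · simp
    · right
      cases cols with
      | nil => exact absurd rfl h1
      | cons c t =>
        have : c.length = 0 := h2 c (by simp)
        simp [List.any_cons, List.eq_nil_of_length_eq_zero this]
  | succ n ih =>
    intro cols h1 h2
    have hne : ∀ c ∈ cols, c ≠ [] := by
      intro c hc he
      have := h2 c hc
      rw [he] at this
      simp at this
    rw [pvZipStar.eq_def, dif_neg]
    · rw [ih (cols.map List.tail) (by simpa using h1)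
          (by intro c hc
              obtain ⟨c0, hc0, rfl⟩ := List.mem_map.mp hc
              have := h2 c0 hc0
              have := List.length_tail (l := c0)
              omega)]
      rw [List.range_succ_eq_map, List.map_cons]
      congr 1
      · apply List.map_congr_left
        intro c hc
        exact pv_headD_getD_zero c false
      · rw [List.map_map]
        apply List.map_congr_left
        intro y hy
        simp only [Function.comp, List.map_map]
        apply List.map_congr_left
        intro c hc
        cases c with
        | nil => exact absurd rfl (hne [] hc)
        | cons a as => rfl
    · intro hor
      rcases hor with he | ha
      · exact h1 he
      · obtain ⟨c, hc, hemp⟩ := List.any_eq_true.mp ha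
        exact hne c hc (List.isEmpty_iff.mp hemp)

-- ===== VERDICT (by name: the statement is the Claim_ definition above) =====
theorem create_dot_map_spec : Claim_equal_create_dot_map := by
  intro l _ hpre
  obtain ⟨hne, hprex, hprey⟩ := hpre
  obtain ⟨mx, hmx⟩ : ∃ m, PySem.List.max? (l.map Prod.fst) (fun x : Int => x) = some m := by
    cases h : PySem.List.max? (l.map Prod.fst) (fun x : Int => x) with
    | none => rw [PySem.List.max?_eq_none_iff, List.map_eq_nil_iff] at h; exact absurd h hne
    | some m => exact ⟨m, rfl⟩
  obtain ⟨my, hmy⟩ : ∃ m, PySem.List.max? (l.map Prod.snd) (fun x : Int => x) = some m := by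
    cases h : PySem.List.max? (l.map Prod.snd) (fun x : Int => x) with
    | none => rw [PySem.List.max?_eq_none_iff, List.map_eq_nil_iff] at h; exact absurd h hne
    | some m => exact ⟨m, rfl⟩
  have hbx : ∀ p ∈ l, p.1 ≤ mx := fun p hp =>
    PySem.List.max?_isMax hmx p.1 (List.mem_map.mpr ⟨p, hp, rfl⟩)
  have hby : ∀ p ∈ l, p.2 ≤ my := fun p hp =>
    PySem.List.max?_isMax hmy p.2 (List.mem_map.mpr ⟨p, hp, rfl⟩)
  have hmx0 : 0 ≤ mx := by
    obtain ⟨p, hp, he⟩ := List.mem_map.mp (PySem.List.max?_mem hmx)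
    obtain ⟨q, hq, hq0, -⟩ := hprex p hp
    exact le_trans hq0 (he ▸ hbx q hq)
  have hmy0 : 0 ≤ my := by
    obtain ⟨p, hp, he⟩ := List.mem_map.mp (PySem.List.max?_mem hmy)
    obtain ⟨q, hq, hq0, -⟩ := hprey p hp
    exact le_trans hq0 (he ▸ hby q hq)
  have hb : ∀ p ∈ l, -(mx + 1) ≤ p.1 ∧ p.1 < mx + 1 ∧ -(my + 1) ≤ p.2 ∧ p.2 < my + 1 := by
    intro p hp
    obtain ⟨q1, hq1, hq10, hq1b⟩ := hprex p hp
    obtain ⟨q2, hq2, hq20, hq2b⟩ := hprey p hp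
    have := hbx q1 hq1
    have := hby q2 hq2
    have := hbx p hp
    have := hby p hp
    omega
  have ew : (((mx + 1).toNat : Int)) = mx + 1 := by omega
  have eh : (((my + 1).toNat : Int)) = my + 1 := by omega
  show create_dot_map l = create_dot_map_alt l
  unfold create_dot_map create_dot_map_alt
  rw [hmx, hmy]
  simp only [Option.getD_some, List.map_const', PySem.List.length_pyRange_one, sub_zero]
  -- named shapes
  set W : Nat := (mx + 1).toNat with hW
  set H : Nat := (my + 1).toNat with hH
  have hWpos : 0 < W := by omega
  have hHpos : 0 < H := by omega
  -- A's fold in pair-list form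
  have hfA : l.foldl (fun g p => pvMark "#" g p.2 p.1)
        (List.replicate H (List.replicate W "."))
      = (l.map (fun p => (p.2, p.1))).foldl (fun g q => pvMark "#" g q.1 q.2)
        (List.replicate H (List.replicate W ".")) := by
    rw [List.foldl_map]
  rw [hfA]
  -- initial grids
  have hgridA : ∀ i : Nat, i < H →
      ((List.replicate H (List.replicate W ".")).getD i []) = List.replicate W "." := by
    intro i hi
    rw [List.getD_eq_getElem _ _ (by simpa using hi), List.getElem_replicate]
  have hlenA : (List.replicate H (List.replicate W ".")).length = H := List.length_replicate
  have hrowA : ∀ j : Nat, j < H →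
      (((List.replicate H (List.replicate W "."))).getD j []).length = W := by
    intro j hj
    rw [hgridA j hj, List.length_replicate]
  have hgridB : ∀ i : Nat, i < W →
      ((List.replicate W (List.replicate H false)).getD i []) = List.replicate H false := by
    intro i hi
    rw [List.getD_eq_getElem _ _ (by simpa using hi), List.getElem_replicate]
  have hlenB : (List.replicate W (List.replicate H false)).length = W := List.length_replicate
  have hrowB : ∀ j : Nat, j < W →
      (((List.replicate W (List.replicate H false))).getD j []).length = H := by
    intro j hj
    rw [hgridB j hj, List.length_replicate]
  have hbA : ∀ q ∈ l.map (fun p => (p.2, p.1)),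
      -(H : Int) ≤ q.1 ∧ q.1 < (H : Int) ∧ -(W : Int) ≤ q.2 ∧ q.2 < (W : Int) := by
    intro q hq
    obtain ⟨p, hp, rfl⟩ := List.mem_map.mp hq
    obtain ⟨b1, b2, b3, b4⟩ := hb p hp
    rw [hW, hH]
    constructor; · omega
    constructor; · omega
    constructor; · omega
    omega
  have hbB : ∀ q ∈ l,
      -(W : Int) ≤ q.1 ∧ q.1 < (W : Int) ∧ -(H : Int) ≤ q.2 ∧ q.2 < (H : Int) := by
    intro q hq
    obtain ⟨b1, b2, b3, b4⟩ := hb q hq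
    rw [hW, hH]
    constructor; · omega
    constructor; · omega
    constructor; · omega
    omega
  -- the painted column mask
  set painted : List (List Bool) :=
    l.foldl (fun cs p => pvMark true cs p.1 p.2) (List.replicate W (List.replicate H false))
    with hpainted
  have hplen : painted.length = W := by
    rw [hpainted, pv_paint_len, hlenB]
  have hprow : ∀ j : Nat, j < W → (painted.getD j []).length = H := by
    intro j hj
    rw [hpainted, pv_paint_row_len, hrowB j hj]
  have hpmem : ∀ c ∈ painted, c.length = H := by
    intro c hc
    obtain ⟨i, hi, rfl⟩ := List.mem_iff_getElem.mp hc
    rw [← List.getD_eq_getElem _ [] hi]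
    exact hprow i (by omega)
  have hzip : pvZipStar painted
      = (List.range H).map (fun y => painted.map (fun c => c.getD y false)) :=
    pvZipStar_eq H painted (by intro he; rw [he] at hplen; simp at hplen; omega) hpmem
  rw [hzip]
  -- cell-by-cell equality
  apply List.ext_getElem
  · rw [pv_paint_len, hlenA, List.length_map, List.length_map, List.length_range]
  · intro i h1 h2
    have hi : i < H := by
      have := h1; rwa [pv_paint_len, hlenA] at this
    rw [← List.getD_eq_getElem _ [] h1]
    rw [List.getElem_map, List.getElem_map, List.getElem_range]
    apply List.ext_getElem
    · rw [pv_paint_row_len, hrowA i hi, List.length_map, List.length_map, hplen]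
    · intro j g1 g2
      have hj : j < W := by
        have := g1; rwa [pv_paint_row_len, hrowA i hi] at this
      rw [← List.getD_eq_getElem _ "." g1,
          pv_paint_cell "#" "." (l.map (fun p => (p.2, p.1))) _ H W hlenA hrowA hbA i j hi hj,
          hgridA i hi]
      rw [List.getElem_map, List.getElem_map]
      have hcell : painted[j].getD i false = (painted.getD j []).getD i false := by
        rw [List.getD_eq_getElem _ [] (by omega : j < painted.length)]
      rw [hcell, hpainted,
          pv_paint_cell true false l _ W H hlenB hrowB hbB j i hj hi,
          hgridB j hj]
      have hmm : (((j : Int), (i : Int)) ∈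
            (l.map (fun p => (p.2, p.1))).map (fun q => (PySem.Int.mod q.2 W, PySem.Int.mod q.1 H)))
          ↔ (((i : Int), (j : Int)) ∈
            l.map (fun q => (PySem.Int.mod q.2 H, PySem.Int.mod q.1 W))) := by
      -- same wrapped cell, coordinates swapped
        rw [List.map_map]
        simp only [List.mem_map, Function.comp, Prod.mk.injEq]
        constructor
        · rintro ⟨p, hp, e1, e2⟩; exact ⟨p, hp, e2, e1⟩
        · rintro ⟨p, hp, e1, e2⟩; exact ⟨p, hp, e2, e1⟩
      by_cases hm : ((i : Int), (j : Int)) ∈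
          l.map (fun q => (PySem.Int.mod q.2 H, PySem.Int.mod q.1 W))
      · rw [if_pos (hmm.mpr hm), if_pos hm]
        rfl
      · rw [if_neg (fun hc => hm (hmm.mp hc)), if_neg hm]
        rw [List.getD_eq_getElem _ "." (by simpa using hj),
            List.getD_eq_getElem _ false (by simpa using hi),
            List.getElem_replicate, List.getElem_replicate]
        rfl
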